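-- pv_equiv track=rewrite | github.com/basvasilich/advent-of-code-2023 | day9/solution.py | step
-- ===== SOURCE A (Python) =====
-- def step(inpt: list[list[int]]) -> list[list[int]]:
--     if all(x == 0 for x in inpt[-1]):
--         return inpt
--     result = []
--     for i in range(1, len(inpt[-1])):
--         result.append(inpt[-1][i] - inpt[-1][i - 1])
--     inpt.append(result)
--     return step(inpt)
-- ===== SOURCE B (Python) =====
-- def _rows_below(row: list[int]) -> list[list[int]]:
--     # pure helper: all difference rows strictly below `row`, down to the all-zero row
--     if all(x == 0 for x in row):
--         return []
--     nxt = [b - a for a, b in zip(row, row[1:])]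
--     return [nxt] + _rows_below(nxt)
--
--
-- def step(inpt: list[list[int]]) -> list[list[int]]:
--     # compute the whole remaining triangle from the last row, then extend in place once
--     inpt.extend(_rows_below(inpt[-1]))
--     return inpt
-- ===== Notes on version B (the rewrite author's own statement) =====
-- stated objective: simpler
-- what changed: Instead of A's tail recursion on the growing list with an indexed inner loop, B has a pure helper that recurses on a single row (building each next row by zipping the row with its tail) to produce all remaining difference rows, and appends them to inpt in one extend.
import Mathlib
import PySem

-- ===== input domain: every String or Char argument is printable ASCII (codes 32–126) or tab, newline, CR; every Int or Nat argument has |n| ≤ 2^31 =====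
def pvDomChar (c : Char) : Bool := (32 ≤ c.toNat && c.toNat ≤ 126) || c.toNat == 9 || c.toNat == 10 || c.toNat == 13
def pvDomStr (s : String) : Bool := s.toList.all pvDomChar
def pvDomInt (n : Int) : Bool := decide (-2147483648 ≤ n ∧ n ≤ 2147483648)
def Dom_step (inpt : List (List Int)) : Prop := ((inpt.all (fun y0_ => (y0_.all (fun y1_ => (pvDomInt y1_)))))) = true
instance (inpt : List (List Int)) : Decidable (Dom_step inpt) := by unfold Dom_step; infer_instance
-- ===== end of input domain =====

-- B computes all remaining difference rows by a pure recursion on a single row and appends them at once; return value proved equal (both mutate the argument in place in Python).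

-- ===== PORT A =====
-- recursive on the growing list: check last row, build result by indexed loop over range(1, len), append, recurse
def step (inpt : List (List Int)) : List (List Int) :=
  if (inpt.getLastD []).all (fun x => x == 0) then inpt
  else
    step (inpt ++ [(List.range' 1 ((inpt.getLastD []).length - 1)).map
      (fun i => (inpt.getLastD []).getD i 0 - (inpt.getLastD []).getD (i - 1) 0)])
termination_by (inpt.getLastD []).length
decreasing_by
  simp only [List.getLastD_concat, List.length_map, List.length_range']
  rename_i h
  have hne : inpt.getLastD [] ≠ [] := by
    intro hn; apply h; rw [hn]; simp
  have : 0 < (inpt.getLastD []).length := List.length_pos_iff.mpr hne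
  omega

-- ===== PORT B =====
-- pure helper: all difference rows strictly below `row`, down to the all-zero row
def rowsBelow (row : List Int) : List (List Int) :=
  if row.all (fun x => x == 0) then []
  else
    let nxt := List.zipWith (fun a b => b - a) row row.tail
    nxt :: rowsBelow nxt
termination_by row.length
decreasing_by
  simp only [List.length_zipWith, List.length_tail]
  rename_i h
  have : row ≠ [] := by intro hn; apply h; rw [hn]; simp
  have : 0 < row.length := List.length_pos_iff.mpr this
  omega

def step_alt (inpt : List (List Int)) : List (List Int) :=
  inpt ++ rowsBelow (inpt.getLastD [])

-- ===== PRECONDITION & SPEC =====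
-- Pre_ excludes only the empty list, on which Python's inpt[-1] raises IndexError in both A and B.
def Pre_step (inpt : List (List Int)) : Prop := inpt ≠ []
instance (inpt : List (List Int)) : Decidable (Pre_step inpt) := by unfold Pre_step; infer_instance
def pvWitness_step : List (List Int) := [[1, 2, 3]]

def Spec_step (inpt : List (List Int)) (out : List (List Int)) : Prop := out = step_alt inpt
instance (inpt : List (List Int)) (out : List (List Int)) : Decidable (Spec_step inpt out) := by unfold Spec_step; infer_instance

-- ===== CLAIM (what is proved, stated in full; the proofs are below) =====
def Claim_equal_step : Prop := ∀ (inpt : List (List Int)), Dom_step inpt → Pre_step inpt → Spec_step inpt (step inpt)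

-- ===== LEMMAS AND PROOFS =====

-- A's indexed row-building equals B's zip row-building
lemma rows_eq (l : List Int) :
    (List.range' 1 (l.length - 1)).map (fun i => l.getD i 0 - l.getD (i - 1) 0)
      = List.zipWith (fun a b => b - a) l l.tail := by
  apply List.ext_getElem
  · simp
  · intro i h1 h2
    simp only [List.getElem_map, List.getElem_range', List.getElem_zipWith,
      List.getElem_tail]
    simp only [List.length_map, List.length_range'] at h1
    rw [List.getD_eq_getElem l 0 (by omega), List.getD_eq_getElem l 0 (by omega)]
    congr 2 <;> omega

lemma step_eq_alt (inpt : List (List Int)) : step inpt = step_alt inpt := by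
  induction inpt using step.induct with
  | case1 inpt h =>
    rw [step, if_pos h]
    unfold step_alt rowsBelow
    rw [if_pos h, List.append_nil]
  | case2 inpt h ih =>
    rw [step, if_neg h, ih]
    unfold step_alt
    rw [List.getLastD_concat, rows_eq]
    conv_rhs => rw [rowsBelow, if_neg h]
    simp

-- ===== VERDICT (by name: the statement is the Claim_ definition above) =====
theorem step_spec : Claim_equal_step := by
  intro inpt _ _
  exact step_eq_alt inpt
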